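-- pv_equiv track=rewrite | github.com/RYOSKATE/refactory-with-gpt | basic_framework/repair_with_gpt.py | replace_whitespace_with_tab
-- ===== SOURCE A (Python) =====
-- def replace_whitespace_with_tab(code):
--     lines = code.split("\n")
--     for i in range(len(lines)):
--         count = 0
--         for char in lines[i]:
--             if char == " ":
--                 count += 1
--             else:
--                 break
--         lines[i] = "\t"*(count//4) + lines[i][count:]
--     return "\n".join(lines)
-- ===== SOURCE B (Python) =====
-- def replace_whitespace_with_tab(code):
--     # Single left-to-right pass (state machine): no split, no per-line rescan, no join.
--     out = []
--     at_start = True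
--     run = 0
--     for ch in code:
--         if at_start and ch == " ":
--             run += 1
--         elif ch == "\n":
--             if at_start:
--                 out.append("\t" * (run // 4))
--             out.append("\n")
--             at_start = True
--             run = 0
--         else:
--             if at_start:
--                 out.append("\t" * (run // 4))
--                 at_start = False
--             out.append(ch)
--     if at_start:
--         out.append("\t" * (run // 4))
--     return "".join(out)
-- ===== Notes on version B (the rewrite author's own statement) =====
-- stated objective: alternative
-- what changed: Replaced split-into-lines / per-line leading-space rescan / join with a single left-to-right character pass driven by an at-line-start state machine that counts the space run and emits tabs in place.
import Mathlib
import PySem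

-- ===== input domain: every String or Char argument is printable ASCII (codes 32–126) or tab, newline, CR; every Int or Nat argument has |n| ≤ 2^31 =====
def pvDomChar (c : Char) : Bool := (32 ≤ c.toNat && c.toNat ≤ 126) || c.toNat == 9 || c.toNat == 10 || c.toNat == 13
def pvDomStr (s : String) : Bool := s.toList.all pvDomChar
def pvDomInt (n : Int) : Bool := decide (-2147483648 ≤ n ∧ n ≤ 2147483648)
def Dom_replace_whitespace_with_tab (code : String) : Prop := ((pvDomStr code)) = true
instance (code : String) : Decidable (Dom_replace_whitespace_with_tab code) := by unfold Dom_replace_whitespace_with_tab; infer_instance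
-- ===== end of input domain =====

-- B replaces A's split/per-line-rescan/join with one left-to-right state-machine pass; same result, same O(n) cost.

-- ===== PORT A =====
-- inner `for char in lines[i]: … break` loop: count leading spaces
def pvCountA : List Char → Nat
  | [] => 0
  | c :: rest => if c = ' ' then pvCountA rest + 1 else 0

-- "\t"*(count//4) + lines[i][count:]
def pvProcA (line : List Char) : List Char :=
  List.replicate (pvCountA line / 4) '\t' ++ PySem.List.slice line (some (pvCountA line : Int)) none

def replace_whitespace_with_tab (code : String) : String :=
  let lines := PySem.Chars.splitOn code.toList ['\n']
  String.mk (PySem.Chars.join ['\n'] (lines.map pvProcA))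

-- ===== PORT B =====
-- loop body of Source B: state = (out, at_start, run)
def pvStepB (st : List Char × Bool × Nat) (ch : Char) : List Char × Bool × Nat :=
  let (out, at_start, run) := st
  if at_start && ch == ' ' then (out, at_start, run + 1)
  else if ch == '\n' then
    ((if at_start then out ++ List.replicate (run / 4) '\t' else out) ++ ['\n'], true, 0)
  else
    ((if at_start then out ++ List.replicate (run / 4) '\t' else out) ++ [ch], false, run)

def replace_whitespace_with_tab_alt (code : String) : String :=
  let st := code.toList.foldl pvStepB ([], true, 0)
  String.mk (if st.2.1 then st.1 ++ List.replicate (st.2.2 / 4) '\t' else st.1)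

-- ===== PRECONDITION & SPEC =====
def Spec_replace_whitespace_with_tab (code : String) (out : String) : Prop := out = replace_whitespace_with_tab_alt code
instance (code : String) (out : String) : Decidable (Spec_replace_whitespace_with_tab code out) := by unfold Spec_replace_whitespace_with_tab; infer_instance

-- ===== CLAIM (what is proved, stated in full; the proofs are below) =====
def Claim_equal_replace_whitespace_with_tab : Prop := ∀ (code : String), Dom_replace_whitespace_with_tab code → Spec_replace_whitespace_with_tab code (replace_whitespace_with_tab code)

-- ===== LEMMAS AND PROOFS =====

-- reference splitter: Python's s.split("\n")
def pvSplit : List Char → List (List Char)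
  | [] => [[]]
  | c :: r =>
    match pvSplit r with
    | p :: ps => if c = '\n' then [] :: p :: ps else (c :: p) :: ps
    | [] => [[c]]

-- reference state-machine output: gh cs at_start run
def pvGH : List Char → Bool → Nat → List Char
  | [], true, run => List.replicate (run / 4) '\t'
  | [], false, _ => []
  | c :: r, true, run =>
    if c = ' ' then pvGH r true (run + 1)
    else if c = '\n' then List.replicate (run / 4) '\t' ++ '\n' :: pvGH r true 0
    else List.replicate (run / 4) '\t' ++ c :: pvGH r false 0
  | c :: r, false, _ =>
    if c = '\n' then '\n' :: pvGH r true 0 else c :: pvGH r false 0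

theorem pvSplit_ne_nil (cs : List Char) : pvSplit cs ≠ [] := by
  cases cs with
  | nil => simp [pvSplit]
  | cons c r =>
    simp only [pvSplit]
    rcases h : pvSplit r with _ | ⟨p, ps⟩ <;> simp_all <;> split <;> simp

theorem pvSplitOn_go_eq (fuel : Nat) (l cur : List Char) (acc : List (List Char))
    (h : l.length < fuel) :
    PySem.Chars.splitOn.go ['\n'] fuel l cur acc =
      acc.reverse ++ (cur.reverse ++ (pvSplit l).headI) :: (pvSplit l).tail := by
  induction fuel generalizing l cur acc with
  | zero => omega
  | succ f ih =>
    cases l with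
    | nil => simp [PySem.Chars.splitOn.go, pvSplit]
    | cons c rest =>
      by_cases hc : c = '\n'
      · subst hc
        have : List.isPrefixOf ['\n'] ('\n' :: rest) = true := by simp [List.isPrefixOf]
        simp only [PySem.Chars.splitOn.go, this, if_pos]
        rw [ih _ _ _ (by simpa using Nat.lt_of_succ_lt_succ h)]
        simp [pvSplit]
        rcases hs : pvSplit rest with _ | ⟨p, ps⟩
        · exact absurd hs (pvSplit_ne_nil rest)
        · simp
      · have : List.isPrefixOf ['\n'] (c :: rest) = false := by
          simp [List.isPrefixOf]; exact fun h => hc h.symm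
        simp only [PySem.Chars.splitOn.go, this, Bool.false_eq_true, if_false]
        rw [ih _ _ _ (by simpa using Nat.lt_of_succ_lt_succ h)]
        rcases hs : pvSplit rest with _ | ⟨p, ps⟩
        · exact absurd hs (pvSplit_ne_nil rest)
        · simp [pvSplit, hs, hc]

theorem pvSplitOn_eq (cs : List Char) :
    PySem.Chars.splitOn cs ['\n'] = pvSplit cs := by
  unfold PySem.Chars.splitOn
  rw [pvSplitOn_go_eq _ _ _ _ (by omega)]
  rcases hs : pvSplit cs with _ | ⟨p, ps⟩
  · exact absurd hs (pvSplit_ne_nil cs)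
  · simp

theorem pvProcA_eq (line : List Char) :
    pvProcA line = List.replicate (pvCountA line / 4) '\t' ++ line.drop (pvCountA line) := by
  simp [pvProcA, PySem.List.slice_from_natCast]

theorem pvJoin_head_append (a p : List Char) (L : List (List Char)) :
    PySem.Chars.join ['\n'] ((a ++ p) :: L) = a ++ PySem.Chars.join ['\n'] (p :: L) := by
  cases L with
  | nil => simp [PySem.Chars.join, List.intercalate]
  | cons q L => rw [PySem.Chars.join_cons_cons, PySem.Chars.join_cons_cons]; simp

-- the state-machine output as a function of the split lines
theorem pvGH_eq (cs : List Char) :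
    (∀ run, pvGH cs true run =
      PySem.Chars.join ['\n']
        ((List.replicate ((run + pvCountA (pvSplit cs).headI) / 4) '\t' ++
            (pvSplit cs).headI.drop (pvCountA (pvSplit cs).headI)) ::
          (pvSplit cs).tail.map pvProcA)) ∧
    pvGH cs false 0 =
      PySem.Chars.join ['\n'] ((pvSplit cs).headI :: (pvSplit cs).tail.map pvProcA) := by
  induction cs with
  | nil => simp [pvGH, pvSplit, pvCountA, PySem.Chars.join, List.intercalate]
  | cons c r ih =>
    obtain ⟨ihT, ihF⟩ := ih
    rcases hs : pvSplit r with _ | ⟨p, ps⟩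
    · exact absurd hs (pvSplit_ne_nil r)
    constructor
    · intro run
      by_cases hsp : c = ' '
      · subst hsp
        have hsplit : pvSplit (' ' :: r) = (' ' :: p) :: ps := by simp [pvSplit, hs]
        have hg : pvGH (' ' :: r) true run = pvGH r true (run + 1) := by simp [pvGH]
        rw [hsplit, hg, ihT (run + 1)]
        simp [hs, pvCountA, Nat.add_comm, Nat.add_left_comm, Nat.add_assoc]
      · by_cases hnl : c = '\n'
        · subst hnl
          have hsplit : pvSplit ('\n' :: r) = [] :: p :: ps := by simp [pvSplit, hs]
          have hg : pvGH ('\n' :: r) true run =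
              List.replicate (run / 4) '\t' ++ '\n' :: pvGH r true 0 := by simp [pvGH]
          rw [hsplit, hg, ihT 0]
          simp only [hs, List.headI_cons, List.tail_cons, List.map_cons]
          rw [PySem.Chars.join_cons_cons]
          simp [pvCountA, pvProcA_eq]
        · have hsplit : pvSplit (c :: r) = (c :: p) :: ps := by simp [pvSplit, hs, hnl]
          have hg : pvGH (c :: r) true run =
              List.replicate (run / 4) '\t' ++ c :: pvGH r false 0 := by
            simp [pvGH, hsp, hnl]
          rw [hsplit, hg, ihF]
          have hc0 : pvCountA (c :: p) = 0 := by simp [pvCountA, hsp]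
          simp only [List.headI_cons, List.tail_cons, hs, hc0, Nat.add_zero, List.drop_zero]
          rw [show List.replicate (run / 4) '\t' ++ c :: p =
              (List.replicate (run / 4) '\t' ++ [c]) ++ p by simp,
            pvJoin_head_append]
          simp
    · by_cases hnl : c = '\n'
      · subst hnl
        have hsplit : pvSplit ('\n' :: r) = [] :: p :: ps := by simp [pvSplit, hs]
        have hg : pvGH ('\n' :: r) false 0 = '\n' :: pvGH r true 0 := by simp [pvGH]
        rw [hsplit, hg, ihT 0]
        simp only [hs, List.headI_cons, List.tail_cons, List.map_cons]
        rw [PySem.Chars.join_cons_cons]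
        simp [pvCountA, pvProcA_eq]
      · have hsplit : pvSplit (c :: r) = (c :: p) :: ps := by simp [pvSplit, hs, hnl]
        have hg : pvGH (c :: r) false 0 = c :: pvGH r false 0 := by simp [pvGH, hnl]
        rw [hsplit, hg, ihF]
        simp only [List.headI_cons, List.tail_cons, hs]
        rw [show (c :: p) = [c] ++ p from rfl, pvJoin_head_append]
        simp

-- finalization step of Source B (proof-side helper)
def pvFin (st : List Char × Bool × Nat) : List Char :=
  if st.2.1 then st.1 ++ List.replicate (st.2.2 / 4) '\t' else st.1

-- B's fold, finalized, computes the state machine pvGH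
theorem pvFoldB_eq (cs : List Char) :
    (∀ out run, pvFin (cs.foldl pvStepB (out, true, run)) = out ++ pvGH cs true run) ∧
    (∀ out run, pvFin (cs.foldl pvStepB (out, false, run)) = out ++ pvGH cs false 0) := by
  induction cs with
  | nil => simp [pvFin, pvGH]
  | cons c r ih =>
    obtain ⟨ihT, ihF⟩ := ih
    constructor
    · intro out run
      by_cases hsp : c = ' '
      · subst hsp
        have hstep : pvStepB (out, true, run) ' ' = (out, true, run + 1) := by simp [pvStepB]
        rw [List.foldl_cons, hstep, ihT]
        simp [pvGH]
      · by_cases hnl : c = '\n'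
        · subst hnl
          have hstep : pvStepB (out, true, run) '\n' =
              (out ++ List.replicate (run / 4) '\t' ++ ['\n'], true, 0) := by
            simp [pvStepB]
          rw [List.foldl_cons, hstep, ihT]
          simp [pvGH]
        · have hstep : pvStepB (out, true, run) c =
              (out ++ List.replicate (run / 4) '\t' ++ [c], false, run) := by
            simp [pvStepB, hsp, hnl]
          rw [List.foldl_cons, hstep, ihF]
          simp [pvGH, hsp, hnl]
    · intro out run
      by_cases hnl : c = '\n'
      · subst hnl
        have hstep : pvStepB (out, false, run) '\n' = (out ++ ['\n'], true, 0) := by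
          simp [pvStepB]
        rw [List.foldl_cons, hstep, ihT]
        simp [pvGH]
      · have hstep : pvStepB (out, false, run) c = (out ++ [c], false, run) := by
          simp [pvStepB, hnl]
        rw [List.foldl_cons, hstep, ihF]
        simp [pvGH, hnl]

-- ===== VERDICT (by name: the statement is the Claim_ definition above) =====
theorem replace_whitespace_with_tab_spec : Claim_equal_replace_whitespace_with_tab := by
  intro code _
  show String.mk (PySem.Chars.join ['\n'] ((PySem.Chars.splitOn code.toList ['\n']).map pvProcA)) =
    String.mk (pvFin (code.toList.foldl pvStepB ([], true, 0)))
  rw [pvSplitOn_eq, (pvFoldB_eq code.toList).1 [] 0]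
  rcases hs : pvSplit code.toList with _ | ⟨p, ps⟩
  · exact absurd hs (pvSplit_ne_nil code.toList)
  · rw [(pvGH_eq code.toList).1 0]
    simp only [hs, List.headI_cons, List.tail_cons, List.map_cons, pvProcA_eq]
    simp
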